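-- pv_equiv track=rewrite | github.com/Olle7/digit_base_conversions | teisenda_antud_baasi.py | first_numbers_in_base_with_0fill
-- ===== SOURCE A (Python) =====
-- def first_numbers_in_base_with_0fill(digits, base):
--     if base==0:
--         return []
--     number=[0]*digits
--     numbers=[number.copy()]
--     base=base-1
--     while True:
--         for i in range(digits-1,-1,-1):
--             if number[i]==base:
--                 number[i]=0
--             else:
--                 number[i]+=1
--                 numbers.append(number.copy())
--                 break
--         else:
--             return numbers
-- ===== SOURCE B (Python) =====
-- def first_numbers_in_base_with_0fill(digits, base):
--     if base == 0:
--         return []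
--     result = [[]]
--     for _ in range(digits):
--         result = [xs + [d] for xs in result for d in range(base)]
--     return result
-- ===== Notes on version B (the rewrite author's own statement) =====
-- stated objective: simpler
-- what changed: Replaces the mutable odometer (increment-rightmost-digit while-loop with break/else) by a cartesian-product fold: start from [[]] and extend every prefix by each possible digit, once per digit position; A's infinite loop on base<0 with digits>=1 is excluded by Pre_.
import Mathlib
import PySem

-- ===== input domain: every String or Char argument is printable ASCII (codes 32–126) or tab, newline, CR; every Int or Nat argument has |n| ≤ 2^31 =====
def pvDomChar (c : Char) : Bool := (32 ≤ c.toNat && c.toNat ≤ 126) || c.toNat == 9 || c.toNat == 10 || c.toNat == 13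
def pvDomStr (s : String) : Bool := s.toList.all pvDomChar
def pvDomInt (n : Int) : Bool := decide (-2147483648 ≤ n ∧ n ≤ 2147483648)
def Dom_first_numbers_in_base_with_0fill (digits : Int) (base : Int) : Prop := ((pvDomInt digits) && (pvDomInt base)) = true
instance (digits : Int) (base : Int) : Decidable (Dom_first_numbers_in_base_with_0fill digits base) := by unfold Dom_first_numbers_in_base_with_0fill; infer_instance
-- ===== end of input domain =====

-- B replaces A's mutable odometer loop by a cartesian-product fold (extend every prefix by each digit,
-- once per position); same cost, simpler structure. A mutates only its own locals, no observable side effects.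

-- ===== PORT A =====
-- inner 'for i in range(digits-1,-1,-1)' with break/else: returns 'some number' when the loop broke
-- (after the append of the freshly incremented number), 'none' when it completed without break.
-- The 'none' on pyGet? = IndexError is unreachable here (every index is in range); conflating it with
-- normal completion is therefore exact on all reachable states.
def pvInner (bm1 : Int) (number : List Int) (idxs : List Int) : Option (List Int) :=
  match idxs with
  | [] => none
  | i :: rest =>
    match PySem.List.pyGet? number i with
    | none => none
    | some v =>
      if v = bm1 then pvInner bm1 (PySem.List.pySetD number i 0) rest
      else some (PySem.List.pySetD number i (v + 1))

-- 'while True': fuel = base**digits bounds the iteration count (each pass but the last appends one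
-- fresh number, and there are base**digits of them), so the fuel-0 branch is never reached.
def pvLoop (bm1 digits : Int) : Nat → List Int → List (List Int) → List (List Int)
  | 0, _, numbers => numbers
  | fuel + 1, number, numbers =>
    match pvInner bm1 number (PySem.List.pyRange (digits - 1) (-1) (-1)) with
    | none => numbers
    | some n' => pvLoop bm1 digits fuel n' (numbers ++ [n'])

def first_numbers_in_base_with_0fill (digits : Int) (base : Int) : List (List Int) :=
  if base = 0 then []
  else
    let number : List Int := List.replicate digits.toNat 0   -- [0]*digits ([] when digits ≤ 0)
    pvLoop (base - 1) digits (base.toNat ^ digits.toNat) number [number]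

-- ===== PORT B =====
def first_numbers_in_base_with_0fill_alt (digits : Int) (base : Int) : List (List Int) :=
  if base = 0 then []
  else
    (PySem.List.pyRange 0 digits 1).foldl
      (fun result _ =>
        result.flatMap (fun xs => (PySem.List.pyRange 0 base 1).map (fun d => xs ++ [d])))
      [[]]

-- ===== PRECONDITION & SPEC =====
-- Pre_ excludes exactly base < 0 with digits ≥ 1, where A never returns (its while-loop increments
-- forever because no digit ever equals base-1 < 0).
def Pre_first_numbers_in_base_with_0fill (digits : Int) (base : Int) : Prop := 0 ≤ base ∨ digits ≤ 0
instance (digits : Int) (base : Int) : Decidable (Pre_first_numbers_in_base_with_0fill digits base) := by unfold Pre_first_numbers_in_base_with_0fill; infer_instance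
def pvWitness_first_numbers_in_base_with_0fill : Int × Int := (2, 3)
def Spec_first_numbers_in_base_with_0fill (digits : Int) (base : Int) (out : List (List Int)) : Prop := out = first_numbers_in_base_with_0fill_alt digits base
instance (digits : Int) (base : Int) (out : List (List Int)) : Decidable (Spec_first_numbers_in_base_with_0fill digits base out) := by unfold Spec_first_numbers_in_base_with_0fill; infer_instance

-- ===== CLAIM (what is proved, stated in full; the proofs are below) =====
def Claim_equal_first_numbers_in_base_with_0fill : Prop := ∀ (digits : Int) (base : Int), Dom_first_numbers_in_base_with_0fill digits base → Pre_first_numbers_in_base_with_0fill digits base → Spec_first_numbers_in_base_with_0fill digits base (first_numbers_in_base_with_0fill digits base)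

-- ===== LEMMAS AND PROOFS =====

-- little-endian base-b digits of k, d of them; toDig = the big-endian number A and B list
def toDigLE (b : Nat) : Nat → Nat → List Int
  | 0, _ => []
  | d + 1, k => ((k % b : Nat) : Int) :: toDigLE b d (k / b)

def toDig (b d k : Nat) : List Int := (toDigLE b d k).reverse

-- the odometer increment, little-endian, structurally
def incR (bm1 : Int) : List Int → Option (List Int)
  | [] => none
  | x :: r => if x = bm1 then (incR bm1 r).map (fun s => 0 :: s) else some ((x + 1) :: r)

def pvIdxs (n : Nat) : List Int := PySem.List.pyRange ((n : Int) - 1) (-1) (-1)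

theorem length_toDigLE (b d k : Nat) : (toDigLE b d k).length = d := by
  induction d generalizing k with
  | zero => rfl
  | succ d ih => simp [toDigLE, ih]

theorem toDigLE_zero (b d : Nat) : toDigLE b d 0 = List.replicate d 0 := by
  induction d with
  | zero => rfl
  | succ d ih => simp [toDigLE, ih, List.replicate_succ]

theorem incR_toDigLE (b : Nat) (hb : 1 ≤ b) :
    ∀ (d k : Nat), k < b ^ d →
      incR ((b : Int) - 1) (toDigLE b d k)
        = if k + 1 < b ^ d then some (toDigLE b d (k + 1)) else none := by
  intro d
  induction d with
  | zero =>
    intro k hk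
    have hk0 : k = 0 := by simpa using hk
    subst hk0
    norm_num [toDigLE, incR]
  | succ d ih =>
    intro k hk
    have hb0 : 0 < b := hb
    have hmod : k % b < b := Nat.mod_lt _ hb0
    have hdm := Nat.div_add_mod k b
    have hq : k / b < b ^ d := by
      rw [Nat.div_lt_iff_lt_mul hb0]
      calc k < b ^ (d + 1) := hk
        _ = b ^ d * b := by ring
    by_cases h : k % b = b - 1
    · -- carry: last digit is max, zero it and recurse
      have hx : ((k % b : Nat) : Int) = (b : Int) - 1 := by omega
      have hk1 : k + 1 = b * (k / b + 1) := by
        have hd : b * (k / b + 1) = b * (k / b) + b := by ring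
        omega
      have hmod1 : (k + 1) % b = 0 := by rw [hk1]; simp
      have hdiv1 : (k + 1) / b = k / b + 1 := by rw [hk1]; exact Nat.mul_div_cancel_left _ hb0
      have hiff : k + 1 < b ^ (d + 1) ↔ k / b + 1 < b ^ d := by
        rw [hk1, pow_succ]
        constructor
        · intro h'
          by_contra hc
          push Not at hc
          have : b ^ d * b ≤ b * (k / b + 1) := by
            calc b ^ d * b = b * b ^ d := by ring
              _ ≤ b * (k / b + 1) := Nat.mul_le_mul_left b hc
          omega
        · intro h'
          calc b * (k / b + 1) = (k / b + 1) * b := by ring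
            _ < b ^ d * b := (Nat.mul_lt_mul_right hb0).mpr h'
      simp only [toDigLE, incR, hx]
      rw [if_pos trivial, ih (k / b) hq]
      by_cases h2 : k / b + 1 < b ^ d
      · rw [if_pos h2, if_pos (hiff.mpr h2)]
        simp [hmod1, hdiv1]
      · rw [if_neg h2, if_neg (fun hc => h2 (hiff.mp hc))]
        rfl
    · -- no carry: increment last digit
      have hx : ¬ ((k % b : Nat) : Int) = (b : Int) - 1 := by omega
      have hmod1 : (k + 1) % b = k % b + 1 := by
        have e : k + 1 = b * (k / b) + (k % b + 1) := by omega
        rw [e, Nat.mul_add_mod]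
        exact Nat.mod_eq_of_lt (by omega)
      have hdiv1 : (k + 1) / b = k / b := by
        have e : k + 1 = b * (k / b) + (k % b + 1) := by omega
        rw [e, Nat.mul_add_div hb0]
        have : (k % b + 1) / b = 0 := Nat.div_eq_of_lt (by omega)
        omega
      have hlt : k + 1 < b ^ (d + 1) := by
        rcases Nat.lt_or_ge (k + 1) (b ^ (d + 1)) with h' | h'
        · exact h'
        · exfalso
          have : k + 1 = b ^ (d + 1) := by omega
          have : (k + 1) % b = 0 := by
            rw [this, pow_succ]; simp
          omega
      simp only [toDigLE, incR, if_neg hx, if_pos hlt, hmod1, hdiv1]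
      push_cast
      ring_nf

theorem pvIdxs_zero : pvIdxs 0 = [] :=
  PySem.List.pyRange_neg_one_eq_nil (by norm_num)

theorem pvIdxs_succ (n : Nat) : pvIdxs (n + 1) = (n : Int) :: pvIdxs n := by
  unfold pvIdxs
  have h1 : ((n + 1 : Nat) : Int) - 1 = (n : Int) := by push_cast; ring
  rw [h1, PySem.List.pyRange_neg_one_cons (by omega)]

theorem pvInner_eq (bm1 : Int) :
    ∀ (rev t : List Int),
      pvInner bm1 (rev.reverse ++ t) (pvIdxs rev.length)
        = (incR bm1 rev).map (fun s => s.reverse ++ t) := by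
  intro rev
  induction rev with
  | nil => intro t; simp [pvIdxs_zero, pvInner, incR]
  | cons x r ih =>
    intro t
    have hlist : (x :: r).reverse ++ t = r.reverse ++ x :: t := by simp
    have hlen : (x :: r).length = r.length + 1 := rfl
    rw [hlist, hlen, pvIdxs_succ]
    have hget : PySem.List.pyGet? (r.reverse ++ x :: t) ((r.length : Int))
        = some x := by
      simp
    simp only [pvInner, hget]
    by_cases hx : x = bm1
    · rw [if_pos hx]
      have hset : PySem.List.pySetD (r.reverse ++ x :: t) ((r.length : Int)) 0
          = r.reverse ++ 0 :: t := by
        simp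
      rw [hset, ih (0 :: t)]
      simp only [incR, if_pos hx]
      cases incR bm1 r <;> simp
    · rw [if_neg hx]
      have hset : PySem.List.pySetD (r.reverse ++ x :: t) ((r.length : Int)) (x + 1)
          = r.reverse ++ (x + 1) :: t := by
        simp
      rw [hset]
      simp [incR, if_neg hx]

theorem pvLoop_eq (b d : Nat) (digits : Int) (hb : 1 ≤ b)
    (hidx : PySem.List.pyRange (digits - 1) (-1) (-1) = pvIdxs d) :
    ∀ (fuel k : Nat) (acc : List (List Int)), k < b ^ d → b ^ d - k ≤ fuel →
      pvLoop ((b : Int) - 1) digits fuel (toDig b d k) acc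
        = acc ++ (List.range' (k + 1) (b ^ d - (k + 1))).map (toDig b d) := by
  intro fuel
  induction fuel with
  | zero => intro k acc hk hf; omega
  | succ fuel ih =>
    intro k acc hk hf
    have hcall : pvInner ((b : Int) - 1) (toDig b d k) (PySem.List.pyRange (digits - 1) (-1) (-1))
        = (incR ((b : Int) - 1) (toDigLE b d k)).map (fun s => s.reverse) := by
      rw [hidx]
      have h1 : toDig b d k = (toDigLE b d k).reverse ++ [] := by simp [toDig]
      have h2 : d = (toDigLE b d k).length := (length_toDigLE b d k).symm
      rw [h1]
      rw [show pvIdxs d = pvIdxs (toDigLE b d k).length from by rw [← h2]]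
      rw [pvInner_eq]
      simp
    simp only [pvLoop, hcall, incR_toDigLE b hb d k hk]
    by_cases h2 : k + 1 < b ^ d
    · rw [if_pos h2]
      simp only [Option.map_some]
      rw [show (toDigLE b d (k + 1)).reverse = toDig b d (k + 1) from rfl]
      rw [ih (k + 1) (acc ++ [toDig b d (k + 1)]) h2 (by omega)]
      have : b ^ d - (k + 1) = (b ^ d - (k + 2)) + 1 := by omega
      rw [this, List.range'_succ]
      simp
    · rw [if_neg h2]
      have : b ^ d - (k + 1) = 0 := by omega
      simp [this]

-- ===== B side =====

def pvStep (b : Nat) (res : List (List Int)) : List (List Int) :=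
  res.flatMap (fun xs => (List.range b).map (fun (r : Nat) => xs ++ [(r : Int)]))

theorem foldl_const_iterate {α β : Type} (F : β → β) :
    ∀ (l : List α) (init : β), l.foldl (fun r _ => F r) init = F^[l.length] init := by
  intro l
  induction l with
  | nil => intro init; rfl
  | cons x xs ih =>
    intro init
    simp [List.foldl_cons, ih, Function.iterate_succ_apply]

theorem range_mul (b : Nat) :
    ∀ n : Nat, List.range (n * b) = (List.range n).flatMap (fun q => (List.range b).map (fun r => q * b + r)) := by
  intro n
  induction n with
  | zero => simp
  | succ n ih =>
    have : (n + 1) * b = n * b + b := by ring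
    rw [this, List.range_add, List.range_succ, List.flatMap_append, ← ih]
    simp [Nat.mul_comm]

theorem toDig_split (b d : Nat) (hb : 1 ≤ b) (q r : Nat) (hr : r < b) :
    toDig b (d + 1) (q * b + r) = toDig b d q ++ [(r : Int)] := by
  have hb0 : 0 < b := hb
  have hmod : (q * b + r) % b = r := by
    rw [Nat.mul_comm, Nat.mul_add_mod]; exact Nat.mod_eq_of_lt hr
  have hdiv : (q * b + r) / b = q := by
    rw [Nat.mul_comm, Nat.mul_add_div hb0]
    have : r / b = 0 := Nat.div_eq_of_lt hr
    omega
  simp [toDig, toDigLE, hmod, hdiv]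

theorem iterate_step (b : Nat) (hb : 1 ≤ b) :
    ∀ d : Nat, (pvStep b)^[d] [[]] = (List.range (b ^ d)).map (toDig b d) := by
  intro d
  induction d with
  | zero => simp [toDig, toDigLE]
  | succ d ih =>
    rw [Function.iterate_succ_apply', ih]
    have hsplit : ∀ q : Nat,
        (List.range b).map (fun r => toDig b (d + 1) (q * b + r))
          = (List.range b).map (fun (r : Nat) => toDig b d q ++ [(r : Int)]) := by
      intro q
      apply List.map_congr_left
      intro r hr
      exact toDig_split b d hb q r (List.mem_range.mp hr)
    calc pvStep b ((List.range (b ^ d)).map (toDig b d))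
        = (List.range (b ^ d)).flatMap
            (fun q => (List.range b).map (fun (r : Nat) => toDig b d q ++ [(r : Int)])) := by
          unfold pvStep; rw [List.flatMap_map]
      _ = (List.range (b ^ d)).flatMap
            (fun q => (List.range b).map (fun r => toDig b (d + 1) (q * b + r))) := by
          simp only [hsplit]
      _ = (List.range (b ^ (d + 1))).map (toDig b (d + 1)) := by
          rw [show b ^ (d + 1) = b ^ d * b from by ring, range_mul b (b ^ d), List.map_flatMap]
          simp [List.map_map, Function.comp_def]

-- ===== final assembly =====

theorem main_case (digits base : Int) (hb : 1 ≤ base) :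
    first_numbers_in_base_with_0fill digits base = first_numbers_in_base_with_0fill_alt digits base := by
  have hb0 : ¬ base = 0 := by omega
  set b : Nat := base.toNat with hbdef
  set d : Nat := digits.toNat with hddef
  have hbcast : base = (b : Int) := by omega
  have hb1 : 1 ≤ b := by omega
  have hpow : 0 < b ^ d := pow_pos (by omega : 0 < b) d
  -- A side
  have hinit : List.replicate d (0 : Int) = toDig b d 0 := by
    simp [toDig, toDigLE_zero, List.reverse_replicate]
  have hidx : PySem.List.pyRange (digits - 1) (-1) (-1) = pvIdxs d := by
    by_cases hd : 0 ≤ digits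
    · have : digits = (d : Int) := by omega
      rw [this]; rfl
    · unfold pvIdxs
      rw [PySem.List.pyRange_neg_one_eq_nil (by omega),
          PySem.List.pyRange_neg_one_eq_nil (by omega)]
  have hA : first_numbers_in_base_with_0fill digits base
      = (List.range (b ^ d)).map (toDig b d) := by
    unfold first_numbers_in_base_with_0fill
    rw [if_neg hb0]
    simp only
    rw [hinit, hbcast]
    rw [Int.toNat_natCast, ← hddef]
    have := pvLoop_eq b d digits hb1 hidx (b ^ d) 0 [toDig b d 0] hpow (by omega)
    rw [this]
    have hsplit : b ^ d = (b ^ d - 1) + 1 := by omega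
    rw [List.range_eq_range', hsplit, List.range'_succ]
    simp
  -- B side
  have hBstep : (fun (result : List (List Int)) (_ : Int) =>
        result.flatMap (fun xs => (PySem.List.pyRange 0 base 1).map (fun dg => xs ++ [dg])))
      = (fun result _ => pvStep b result) := by
    funext result i
    unfold pvStep
    congr 1
    funext xs
    rw [hbcast, PySem.List.pyRange_one]
    simp [Int.toNat_natCast]
  have hlen : (PySem.List.pyRange 0 digits 1).length = d := by
    rw [PySem.List.length_pyRange_one]
    omega
  have hB : first_numbers_in_base_with_0fill_alt digits base
      = (List.range (b ^ d)).map (toDig b d) := by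
    unfold first_numbers_in_base_with_0fill_alt
    rw [if_neg hb0, hBstep, foldl_const_iterate (pvStep b) _ [[]], hlen, iterate_step b hb1 d]
  rw [hA, hB]

-- ===== VERDICT (by name: the statement is the Claim_ definition above) =====
theorem first_numbers_in_base_with_0fill_spec : Claim_equal_first_numbers_in_base_with_0fill := by
  intro digits base _ hpre
  unfold Spec_first_numbers_in_base_with_0fill
  by_cases hb0 : base = 0
  · simp [first_numbers_in_base_with_0fill, first_numbers_in_base_with_0fill_alt, hb0]
  · by_cases hb1 : 1 ≤ base
    · exact main_case digits base hb1
    · -- base < 0, hence (Pre_) digits ≤ 0: both sides return [[]]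
      have hneg : base < 0 := by omega
      have hd : digits ≤ 0 := by
        rcases hpre with h | h
        · omega
        · exact h
      have hdz : digits.toNat = 0 := by omega
      have hbz : base.toNat = 0 := by omega
      have hrange : PySem.List.pyRange (digits - 1) (-1) (-1) = [] :=
        PySem.List.pyRange_neg_one_eq_nil (by omega)
      have hrange2 : PySem.List.pyRange 0 digits 1 = [] :=
        PySem.List.pyRange_one_eq_nil (by omega)
      simp [first_numbers_in_base_with_0fill, first_numbers_in_base_with_0fill_alt,
        hb0, hdz, hbz, hrange, hrange2, pvLoop, pvInner]
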